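-- pv_equiv track=rewrite | github.com/raytrin/matematica-discreta-python | unidade-2-combinatoria/calculadora_permutacoes.py | permutacao_elementos_repetidos
-- ===== SOURCE A (Python) =====
-- def fatorial(numero):
--     """Calcula o fatorial de um número n!"""
--
--     if numero < 0:
--         raise ValueError("O fatorial não está definido para números negativos")
--
--     if numero in (0, 1):
--         return 1
--
--     resultado = 1
--     for n in range(2, numero + 1):
--         resultado *= n
--
--     return resultado
--
-- def permutacao_elementos_repetidos(palavra):
--     """
--     Calcula permutação com elementos repetidos: n! / (a! * b! * ...)
--     onde n = total de elementos,
--     a,b,... = frequências dos elementos repetidos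
--     """
--
--     if not palavra:
--         return 0
--
--     # Calcula a frquência de cada caractere
--     processados = []
--     denominador = 1
--
--     for letra in palavra:
--         if letra not in processados:
--             freq = palavra.count(letra)
--             if freq > 1:
--                 denominador *= fatorial(freq)
--             processados.append(letra)
--
--     return fatorial(len(palavra)) // denominador
-- ===== SOURCE B (Python) =====
-- def _binomial(n, k):
--     """C(n, k) by the exact multiplicative formula (each division is exact)."""
--     r = 1
--     for i in range(1, k + 1):
--         r = r * (n - k + i) // i
--     return r
--
-- def permutacao_elementos_repetidos(palavra):
--     """Multinomial coefficient as a product of binomials: count frequencies in one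
--     pass, then multiply C(remaining, f) for each frequency — no factorials and no
--     final division by a denominator."""
--     if not palavra:
--         return 0
--     frequencias = {}
--     for c in palavra:
--         frequencias[c] = frequencias.get(c, 0) + 1
--     resultado = 1
--     restantes = len(palavra)
--     for f in frequencias.values():
--         resultado *= _binomial(restantes, f)
--         restantes -= f
--     return resultado
-- ===== Notes on version B (the rewrite author's own statement) =====
-- stated objective: alternative
-- what changed: B counts frequencies with a dict in one pass and builds the multinomial as a running product of binomial coefficients C(remaining, f) via the exact multiplicative formula, instead of A's quadratic scan (str.count per first occurrence) followed by n! divided by a product of factorials.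
import Mathlib
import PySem

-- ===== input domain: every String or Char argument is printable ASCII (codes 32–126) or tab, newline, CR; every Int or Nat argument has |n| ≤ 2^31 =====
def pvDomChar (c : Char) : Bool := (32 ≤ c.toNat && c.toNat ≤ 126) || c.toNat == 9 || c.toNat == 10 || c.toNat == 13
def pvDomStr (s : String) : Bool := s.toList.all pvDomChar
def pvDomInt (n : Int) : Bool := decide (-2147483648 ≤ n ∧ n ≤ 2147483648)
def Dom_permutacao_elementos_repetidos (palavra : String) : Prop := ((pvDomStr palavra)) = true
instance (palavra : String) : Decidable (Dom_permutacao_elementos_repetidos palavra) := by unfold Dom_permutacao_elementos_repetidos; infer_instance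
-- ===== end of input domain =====

-- B replaces A's n!/(product of factorials), computed via a quadratic first-occurrence scan,
-- by a one-pass frequency dict and a running product of binomial coefficients (objective: alternative).

-- ===== PORT A =====
-- fatorial(numero); the 'numero < 0: raise ValueError' branch is ported as 0 — it is
-- unreachable from permutacao_elementos_repetidos, which only passes lengths/counts ≥ 0.
def fatorial_A (numero : Int) : Int :=
  if numero < 0 then 0
  else if numero = 0 ∨ numero = 1 then 1
  else (PySem.List.pyRange 2 (numero + 1) 1).foldl (fun resultado n => resultado * n) 1

-- loop body of A's 'for letra in palavra'; state = (processados, denominador).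
-- palavra.count(letra): str.count with the 1-character needle [letra] (exact).
def passoA (palavra : String) (st : List Char × Int) (letra : Char) : List Char × Int :=
  if !st.1.contains letra then
    let freq : Int := (PySem.Str.count palavra (String.ofList [letra]) : Int)
    (st.1 ++ [letra], if 1 < freq then st.2 * fatorial_A freq else st.2)
  else st

def permutacao_elementos_repetidos (palavra : String) : Int :=
  if palavra.toList = [] then 0
  else
    let st := palavra.toList.foldl (passoA palavra) ([], 1)
    PySem.Int.floordiv (fatorial_A (palavra.toList.length : Int)) st.2

-- ===== PORT B =====
-- _binomial(n, k): exact multiplicative formula, every intermediate division exact.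
def binomial_B (n k : Int) : Int :=
  (PySem.List.pyRange 1 (k + 1) 1).foldl (fun r i => PySem.Int.floordiv (r * (n - k + i)) i) 1

def permutacao_elementos_repetidos_alt (palavra : String) : Int :=
  if palavra.toList = [] then 0
  else
    let frequencias := palavra.toList.foldl
      (fun (d : PySem.Dict Char Int) c => d.insert c (d.getD c 0 + 1)) PySem.Dict.empty
    (frequencias.values.foldl
      (fun (st : Int × Int) f => (st.1 * binomial_B st.2 f, st.2 - f))
      (1, (palavra.toList.length : Int))).1

-- ===== PRECONDITION & SPEC =====
def Spec_permutacao_elementos_repetidos (palavra : String) (out : Int) : Prop := out = permutacao_elementos_repetidos_alt palavra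
instance (palavra : String) (out : Int) : Decidable (Spec_permutacao_elementos_repetidos palavra out) := by unfold Spec_permutacao_elementos_repetidos; infer_instance

-- ===== CLAIM (what is proved, stated in full; the proofs are below) =====
def Claim_equal_permutacao_elementos_repetidos : Prop := ∀ (palavra : String), Dom_permutacao_elementos_repetidos palavra → Spec_permutacao_elementos_repetidos palavra (permutacao_elementos_repetidos palavra)

-- ===== LEMMAS AND PROOFS =====

-- str.count with a singleton needle is the character count
theorem go_singleton (c : Char) : ∀ (fuel : ℕ) (l : List Char) (acc : ℕ), l.length ≤ fuel →
    PySem.Chars.count.go [c] fuel l acc = acc + l.count c := by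
  intro fuel
  induction fuel with
  | zero =>
    intro l acc h
    have : l = [] := List.eq_nil_of_length_eq_zero (by omega)
    subst this; simp [PySem.Chars.count.go]
  | succ n ih =>
    intro l acc h
    cases l with
    | nil => simp [PySem.Chars.count.go]
    | cons a t =>
      rw [PySem.Chars.count.go]
      by_cases hc : a = c
      · simp only [List.isPrefixOf, hc]
        simp [ih t (acc + 1) (by simpa using h)]
        omega
      · simp only [List.isPrefixOf]
        have : (c == a) = false := by simp; exact fun h' => hc h'.symm
        simp [this, ih t acc (by simpa using h)]
        simp [List.count_cons, hc]

theorem count_singleton (s : String) (c : Char) :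
    PySem.Str.count s (String.ofList [c]) = s.toList.count c := by
  rw [PySem.Str.count_eq]
  have h1 : (String.ofList [c]).toList = [c] := by simp
  rw [h1, PySem.Chars.count]
  simp
  rw [go_singleton c _ s.toList 0 (by simp)]
  simp

-- fatorial_A on a natural argument is the factorial
theorem prodRange_fact : ∀ (n : ℕ),
    (PySem.List.pyRange 2 ((n : Int) + 2) 1).foldl (fun r k => r * k) 1 = ((n + 1).factorial : Int) := by
  intro n
  induction n with
  | zero => simp [PySem.List.pyRange_one_eq_nil, Nat.factorial]
  | succ m ih =>
    have h : PySem.List.pyRange 2 (((m : ℕ) + 1 : ℕ) + 2 : Int) 1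
        = PySem.List.pyRange 2 ((m : Int) + 2) 1 ++ [(m : Int) + 2] := by
      have := PySem.List.pyRange_one_succ_right (a := 2) (b := (m : Int) + 2) (by omega)
      push_cast
      rw [show (m : Int) + 1 + 2 = ((m : Int) + 2) + 1 by ring]
      exact this
    rw [h, List.foldl_append, ih]
    simp [Nat.factorial]
    ring

theorem fatA_cast (m : ℕ) : fatorial_A (m : Int) = (m.factorial : Int) := by
  match m with
  | 0 => simp [fatorial_A]
  | 1 => simp [fatorial_A, Nat.factorial]
  | (n + 2) =>
    unfold fatorial_A
    have h0 : ¬(((n + 2 : ℕ) : Int) < 0) := by push_cast; omega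
    have h1 : ¬(((n + 2 : ℕ) : Int) = 0 ∨ ((n + 2 : ℕ) : Int) = 1) := by push_cast; omega
    rw [if_neg h0, if_neg h1]
    have := prodRange_fact (n + 1)
    push_cast at this ⊢
    rw [show (n : Int) + 2 + 1 = (n : Int) + 1 + 2 by ring]
    exact_mod_cast this

-- binomial_B on naturals k ≤ n is the binomial coefficient
theorem binom_fold (n k : ℕ) (hk : k ≤ n) : ∀ (j : ℕ), j ≤ k →
    (PySem.List.pyRange 1 ((j : Int) + 1) 1).foldl
      (fun r i => PySem.Int.floordiv (r * ((n : Int) - (k : Int) + i)) i) 1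
    = ((n - k + j).choose j : Int) := by
  intro j
  induction j with
  | zero => simp [PySem.List.pyRange_one_eq_nil]
  | succ m ih =>
    intro hm
    have h : PySem.List.pyRange 1 (((m : ℕ) + 1 : ℕ) + 1 : Int) 1
        = PySem.List.pyRange 1 ((m : Int) + 1) 1 ++ [(m : Int) + 1] := by
      have := PySem.List.pyRange_one_succ_right (a := 1) (b := (m : Int) + 1) (by omega)
      push_cast
      exact this
    rw [h, List.foldl_append, ih (by omega)]
    have hc : (n : Int) - (k : Int) + ((m : Int) + 1) = ((n - k + m + 1 : ℕ) : Int) := by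
      have : (k : ℕ) ≤ n := hk
      push_cast [Nat.cast_sub this]
      ring
    simp only [List.foldl_cons, List.foldl_nil]
    rw [hc]
    rw [show ((n - k + m).choose m : Int) * ((n - k + m + 1 : ℕ) : Int)
        = (((n - k + m).choose m * (n - k + m + 1) : ℕ) : Int) by push_cast; ring]
    rw [show ((m : Int) + 1) = ((m + 1 : ℕ) : Int) by push_cast; ring]
    rw [PySem.Int.floordiv_natCast]
    have key : (n - k + m).choose m * (n - k + m + 1) = (n - k + m + 1).choose (m + 1) * (m + 1) := by
      rw [mul_comm]
      exact Nat.add_one_mul_choose_eq (n - k + m) m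
    rw [key, Nat.mul_div_cancel _ (by omega)]
    congr 2

theorem binomB_cast (n k : ℕ) (hk : k ≤ n) : binomial_B (n : Int) (k : Int) = (n.choose k : Int) := by
  unfold binomial_B
  rw [binom_fold n k hk k le_rfl]
  congr 2
  omega

-- A's per-letter loop: the new first occurrences and the denominator product
def newsA : List Char → List Char → List Char
  | [], _ => []
  | c :: l, p => if p.contains c then newsA l p else c :: newsA l (p ++ [c])

def gA (palavra : String) (c : Char) : Int :=
  if 1 < ((PySem.Str.count palavra (String.ofList [c])) : Int)
  then fatorial_A ((PySem.Str.count palavra (String.ofList [c])) : Int) else 1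

theorem newsA_eq_ofList : ∀ (l p : List Char), l.foldl PySem.Set.add p = p ++ newsA l p := by
  intro l
  induction l with
  | nil => intro p; simp [newsA]
  | cons c l ih =>
    intro p
    by_cases hc : p.contains c
    · have hm : c ∈ p := by simpa using hc
      simp [newsA, hm, PySem.Set.add, ih]
    · have hm : c ∉ p := by simpa using hc
      simp only [List.foldl_cons, newsA, hc, PySem.Set.add]
      rw [if_neg (by simpa using hm), ih]
      simp

theorem loopA (palavra : String) : ∀ (l p : List Char) (d : Int),
    l.foldl (passoA palavra) (p, d) = (p ++ newsA l p, d * ((newsA l p).map (gA palavra)).prod) := by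
  intro l
  induction l with
  | nil => intro p d; simp [newsA]
  | cons c l ih =>
    intro p d
    by_cases hc : p.contains c
    · simp only [List.foldl_cons, passoA, hc]
      simp only [newsA, hc, if_true]
      exact ih p d
    · simp only [List.foldl_cons, passoA, hc]
      rw [if_pos (by simp [hc])]
      rw [newsA, if_neg hc, ih (p ++ [c])]
      simp only [List.map_cons, List.prod_cons, gA]
      rw [Prod.mk.injEq]
      refine ⟨by simp, ?_⟩
      by_cases hf : 1 < ((PySem.Str.count palavra (String.ofList [c])) : Int)
      · rw [if_pos hf, if_pos hf, mul_assoc]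
      · rw [if_neg hf, if_neg hf, one_mul]

-- the multinomial recurrence: product of binomials times product of factorials is n!
def prodChoose : ℕ → List ℕ → ℕ
  | _, [] => 1
  | s, f :: fs => s.choose f * prodChoose (s - f) fs

theorem core_multinomial : ∀ (fs : List ℕ) (t : ℕ),
    prodChoose (fs.sum + t) fs * ((fs.map Nat.factorial).prod * t.factorial) = (fs.sum + t).factorial := by
  intro fs
  induction fs with
  | nil => intro t; simp [prodChoose]
  | cons f fs ih =>
    intro t
    simp only [List.sum_cons, List.map_cons, List.prod_cons, prodChoose]
    have hsf : f + fs.sum + t - f = fs.sum + t := by omega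
    have hle : f ≤ f + fs.sum + t := by omega
    have h3 := Nat.choose_mul_factorial_mul_factorial hle
    rw [hsf] at h3 ⊢
    rw [← h3, ← ih t]
    ring

theorem foldB : ∀ (fs : List ℕ) (t : ℕ) (a : Int),
    ((fs.map (Nat.cast : ℕ → Int)).foldl
      (fun (st : Int × Int) f => (st.1 * binomial_B st.2 f, st.2 - f))
      (a, ((fs.sum + t : ℕ) : Int))).1 = a * (prodChoose (fs.sum + t) fs : Int) := by
  intro fs
  induction fs with
  | nil => intro t a; simp [prodChoose]
  | cons f fs ih =>
    intro t a
    simp only [List.map_cons, List.foldl_cons, List.sum_cons]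
    have hle : f ≤ f + fs.sum + t := by omega
    have h1 : binomial_B ((f + fs.sum + t : ℕ) : Int) (f : Int) = ((f + fs.sum + t).choose f : Int) :=
      binomB_cast _ _ hle
    have h2 : ((f + fs.sum + t : ℕ) : Int) - (f : Int) = ((fs.sum + t : ℕ) : Int) := by push_cast; ring
    rw [h1, h2, ih t (a * ((f + fs.sum + t).choose f : Int))]
    simp only [prodChoose]
    have hsf : f + fs.sum + t - f = fs.sum + t := by omega
    rw [hsf]
    push_cast
    ring

-- the counts over the distinct characters sum to the length
theorem sum_counts (l : List Char) :
    ((PySem.Set.ofList l : List Char).map (fun c => l.count c)).sum = l.length := by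
  have hperm : (PySem.Set.ofList l : List Char).Perm l.dedup := by
    rw [List.perm_ext_iff_of_nodup (PySem.Set.nodup_ofList l) l.nodup_dedup]
    intro a
    rw [PySem.Set.mem_ofList, List.mem_dedup]
  rw [(hperm.map (fun c => l.count c)).sum_eq]
  simpa using List.sum_map_count_dedup_eq_length l

theorem ports_agree (palavra : String) :
    permutacao_elementos_repetidos palavra = permutacao_elementos_repetidos_alt palavra := by
  unfold permutacao_elementos_repetidos permutacao_elementos_repetidos_alt
  by_cases hnil : palavra.toList = []
  · simp [hnil]
  · rw [if_neg hnil, if_neg hnil]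
    set l := palavra.toList with hl
    set ds : List Char := PySem.Set.ofList l with hds
    set fs : List ℕ := ds.map (fun c => l.count c) with hfs
    have hnews : newsA l [] = ds := by
      have := newsA_eq_ofList l []
      simpa [hds, PySem.Set.ofList, PySem.Set.empty] using this.symm
    -- A side: the loop builds the denominator, a product of factorials of the counts
    rw [loopA palavra l [] 1, hnews]
    simp only [one_mul]
    have hg : ds.map (gA palavra) = fs.map (fun m => ((m.factorial : ℕ) : Int)) := by
      rw [hfs, List.map_map]
      apply List.map_congr_left
      intro c hc
      have hcl : c ∈ l := (PySem.Set.mem_ofList l c).mp hc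
      have hcount : 0 < l.count c := List.count_pos_iff.mpr hcl
      simp only [Function.comp, gA, count_singleton, ← hl]
      by_cases h1 : 1 < ((l.count c : ℕ) : Int)
      · rw [if_pos h1, fatA_cast]
      · rw [if_neg h1]
        have : l.count c = 1 := by push_cast at h1; omega
        rw [this]
        simp [Nat.factorial]
    rw [hg]
    have hcastprod : (fs.map (fun m => ((m.factorial : ℕ) : Int))).prod
        = (((fs.map Nat.factorial).prod : ℕ) : Int) := by
      rw [Nat.cast_list_prod, List.map_map, hfs, List.map_map, List.map_map]
      congr 1
    rw [hcastprod]
    have hlen : (l.length : Int) = ((l.length : ℕ) : Int) := by norm_num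
    rw [hlen, fatA_cast, PySem.Int.floordiv_natCast]
    -- the division is exact and yields the product of binomials
    have hsum : fs.sum = l.length := sum_counts l
    have hpos : 0 < (fs.map Nat.factorial).prod :=
      List.prod_pos (by intro x hx; simp at hx; obtain ⟨m, _, rfl⟩ := hx; exact m.factorial_pos)
    have hfact : l.length.factorial = prodChoose l.length fs * (fs.map Nat.factorial).prod := by
      have := core_multinomial fs 0
      simp [Nat.factorial] at this
      rw [hsum] at this
      omega
    have hdiv : l.length.factorial / (fs.map Nat.factorial).prod = prodChoose l.length fs := by
      rw [hfact]
      exact Nat.mul_div_cancel _ hpos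
    rw [hdiv]
    -- B side: the dict is the counter, its values are the counts in first-occurrence order
    rw [show l.foldl (fun (d : PySem.Dict Char Int) c => d.insert c (d.getD c 0 + 1)) PySem.Dict.empty
        = PySem.Dict.counter l from PySem.Dict.foldl_insert_getD_add_one_eq_counter l]
    have hvals : (PySem.Dict.counter l).values = fs.map (Nat.cast : ℕ → Int) := by
      simp only [PySem.Dict.values, PySem.Dict.items_counter, hfs, List.map_map]
      rfl
    rw [hvals]
    rw [show ((l.length : Int)) = ((fs.sum + 0 : ℕ) : Int) by rw [hsum]; norm_num]
    rw [foldB fs 0 1]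
    rw [hsum]
    norm_num

-- ===== VERDICT (by name: the statement is the Claim_ definition above) =====
theorem permutacao_elementos_repetidos_spec : Claim_equal_permutacao_elementos_repetidos := by
  intro palavra _
  unfold Spec_permutacao_elementos_repetidos
  exact ports_agree palavra
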